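-- pv_equiv track=rewrite | github.com/Suhail-26/cropdrop-env | inference.py | bfs_next_action
-- ===== SOURCE A (Python) =====
-- from collections import deque
--
-- GRID_SIZE = 10
--
-- def bfs_next_action(agent_pos, target_pos, blocked_tiles=None):
--     """
--     Returns the first action to take toward target_pos using BFS.
--     blocked_tiles: list of [r,c] that are currently blocked.
--     """
--     blocked = set(tuple(t) for t in (blocked_tiles or []))
--     start   = tuple(agent_pos)
--     goal    = tuple(target_pos)
--
--     if start == goal:
--         return None  # already there
--
--     queue = deque([(start, [])])
--     visited = {start}
--     move_map = {
--         "up":    (-1, 0),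
--         "down":  (1,  0),
--         "left":  (0, -1),
--         "right": (0,  1),
--     }
--
--     while queue:
--         pos, path = queue.popleft()
--         for action, (dr, dc) in move_map.items():
--             nr, nc = pos[0] + dr, pos[1] + dc
--             npos = (nr, nc)
--             if not (0 <= nr < GRID_SIZE and 0 <= nc < GRID_SIZE):
--                 continue
--             if npos in blocked or npos in visited:
--                 continue
--             new_path = path + [action]
--             if npos == goal:
--                 return new_path[0]   # first step toward goal
--             visited.add(npos)
--             queue.append((npos, new_path))
--
--     return "right"   # last resort: just move
-- ===== SOURCE B (Python) =====
-- GRID_SIZE = 10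
--
-- MOVES = [("up", -1, 0), ("down", 1, 0), ("left", 0, -1), ("right", 0, 1)]
--
-- def bfs_next_action(agent_pos, target_pos, blocked_tiles=None):
--     """Level-by-level BFS that propagates the FIRST MOVE per cell in a dict
--     (cell -> first action on its BFS path), instead of copying a growing
--     action path into every queue entry; no deque, no path lists."""
--     walls = set(map(tuple, blocked_tiles or []))
--     src, dst = tuple(agent_pos), tuple(target_pos)
--     if src == dst:
--         return None
--
--     first = {src: None}    # cell -> first action taken from src to reach it
--     layer = [src]
--     while layer:
--         pending = []
--         for cur in layer:
--             via = first[cur]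
--             for a, dy, dx in MOVES:
--                 cell = (cur[0] + dy, cur[1] + dx)
--                 if 0 <= cell[0] < GRID_SIZE and 0 <= cell[1] < GRID_SIZE \
--                         and cell not in walls and cell not in first:
--                     step = via if via is not None else a
--                     if cell == dst:
--                         return step
--                     first[cell] = step
--                     pending.append(cell)
--         layer = pending
--     return "right"
-- ===== Notes on version B (the rewrite author's own statement) =====
-- stated objective: alternative
-- what changed: A's deque of (position, growing action-path list) is replaced by a level-by-level BFS over plain position frontiers that propagates only the FIRST action per cell in a dict, so no path list is ever copied and no deque is used.
-- outside the precondition, e.g. on bfs_next_action([5], [1, 2], None): A raises IndexError, B raises IndexError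
import Mathlib
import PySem

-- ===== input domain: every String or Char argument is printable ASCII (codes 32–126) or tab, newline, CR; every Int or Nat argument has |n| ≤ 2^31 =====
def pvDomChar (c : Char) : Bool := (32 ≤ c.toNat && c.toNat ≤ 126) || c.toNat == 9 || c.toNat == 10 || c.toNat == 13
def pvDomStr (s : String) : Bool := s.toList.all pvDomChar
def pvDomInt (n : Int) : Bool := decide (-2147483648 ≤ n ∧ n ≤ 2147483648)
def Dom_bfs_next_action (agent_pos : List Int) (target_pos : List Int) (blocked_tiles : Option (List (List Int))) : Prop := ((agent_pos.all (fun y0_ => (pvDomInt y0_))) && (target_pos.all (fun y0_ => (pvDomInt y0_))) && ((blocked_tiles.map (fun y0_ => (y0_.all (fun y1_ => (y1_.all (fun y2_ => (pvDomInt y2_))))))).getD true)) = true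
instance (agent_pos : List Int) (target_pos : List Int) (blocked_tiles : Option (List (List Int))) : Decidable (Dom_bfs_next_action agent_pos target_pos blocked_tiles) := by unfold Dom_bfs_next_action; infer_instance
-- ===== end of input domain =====

-- B replaces A's deque-of-(pos, path-list) BFS by a level-by-level BFS that propagates
-- only the first move per cell in a dict (alternative decomposition, no speed claim).

-- ===== PORT A =====
-- move_map, in iteration order up/down/left/right
def pvMovesA : List (String × Int × Int) :=
  [("up", -1, 0), ("down", 1, 0), ("left", 0, -1), ("right", 0, 1)]

-- the body of A's `for action, (dr, dc) in move_map.items()` loop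
-- (pos[0]/pos[1] via pyGet?; the .getD 0 is only reached where the Python raises, outside Pre_)
def pvExpandA (blocked : PySem.Set (List Int)) (goal pos : List Int) (path : List String) :
    List (String × Int × Int) → List (List Int × List String) → PySem.Set (List Int) →
    Sum String (List (List Int × List String) × PySem.Set (List Int))
  | [], q, vis => Sum.inr (q, vis)
  | (act, dr, dc) :: ms, q, vis =>
    let nr := ((PySem.List.pyGet? pos 0).getD 0) + dr
    let nc := ((PySem.List.pyGet? pos 1).getD 0) + dc
    let npos := [nr, nc]
    if ¬(0 ≤ nr ∧ nr < 10 ∧ 0 ≤ nc ∧ nc < 10) then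
      pvExpandA blocked goal pos path ms q vis
    else if blocked.contains npos || vis.contains npos then
      pvExpandA blocked goal pos path ms q vis
    else if npos = goal then
      Sum.inl ((path ++ [act]).headD "")   -- new_path[0] (new_path is nonempty)
    else
      pvExpandA blocked goal pos path ms (q ++ [(npos, path ++ [act])]) (PySem.Set.add vis npos)

-- A's `while queue` loop; fuel is a totality guard only (the loop runs at most 101 times)
def pvLoopA (blocked : PySem.Set (List Int)) (goal : List Int) :
    Nat → List (List Int × List String) → PySem.Set (List Int) → String
  | 0, _, _ => "right"
  | _ + 1, [], _ => "right"
  | f + 1, (pos, path) :: q, vis =>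
    match pvExpandA blocked goal pos path pvMovesA q vis with
    | Sum.inl s => s
    | Sum.inr (q', vis') => pvLoopA blocked goal f q' vis'

def bfs_next_action (agent_pos : List Int) (target_pos : List Int) (blocked_tiles : Option (List (List Int))) : Option String :=
  let blocked := PySem.Set.ofList (blocked_tiles.getD [])
  let start := agent_pos
  let goal := target_pos
  if start = goal then none
  else some (pvLoopA blocked goal 1000 [(start, [])] (PySem.Set.ofList [start]))

-- ===== PORT B =====
def pvMovesB : List (String × Int × Int) :=
  [("up", -1, 0), ("down", 1, 0), ("left", 0, -1), ("right", 0, 1)]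

-- `first`: cell ↦ first action on its BFS path (none for the start cell)
abbrev pvTbl := PySem.Dict (List Int) (Option String)

-- B's inner `for a, dy, dx in MOVES` loop over one frontier cell `cur` with `via = first[cur]`
-- (an early `return step` is modelled by Except.error)
def pvScanB (walls : PySem.Set (List Int)) (dst cur : List Int) (via : Option String) :
    List (String × Int × Int) → List (List Int) → pvTbl →
    Except String (List (List Int) × pvTbl)
  | [], pending, first => Except.ok (pending, first)
  | (a, dy, dx) :: mvs, pending, first =>
    let r := ((PySem.List.pyGet? cur 0).getD 0) + dy
    let c := ((PySem.List.pyGet? cur 1).getD 0) + dx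
    let cell := [r, c]
    if (0 ≤ r ∧ r < 10 ∧ 0 ≤ c ∧ c < 10) ∧ walls.contains cell = false ∧ first.get? cell = none then
      let step := match via with | some w => w | none => a
      if cell = dst then Except.error step
      else pvScanB walls dst cur via mvs (pending ++ [cell]) (first.insert cell (some step))
    else pvScanB walls dst cur via mvs pending first

-- B's `for cur in layer` loop: builds the pending next layer and extends `first`
def pvLayerB (walls : PySem.Set (List Int)) (dst : List Int) :
    List (List Int) → List (List Int) → pvTbl → Except String (List (List Int) × pvTbl)
  | [], pending, first => Except.ok (pending, first)
  | cur :: layer, pending, first =>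
    match pvScanB walls dst cur ((first.get? cur).join) pvMovesB pending first with
    | Except.error w => Except.error w
    | Except.ok (pending', first') => pvLayerB walls dst layer pending' first'

-- B's `while layer` loop, one step per LAYER; fuel is a totality guard only
def pvLoopB (walls : PySem.Set (List Int)) (dst : List Int) :
    Nat → List (List Int) → pvTbl → String
  | 0, _, _ => "right"
  | _ + 1, [], _ => "right"
  | f + 1, layer, first =>
    match pvLayerB walls dst layer [] first with
    | Except.error w => w
    | Except.ok (pending, first') => pvLoopB walls dst f pending first'

def bfs_next_action_alt (agent_pos : List Int) (target_pos : List Int) (blocked_tiles : Option (List (List Int))) : Option String :=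
  let walls := PySem.Set.ofList (blocked_tiles.getD [])
  let src := agent_pos
  let dst := target_pos
  if src = dst then none
  else some (pvLoopB walls dst 1000 [src] (PySem.Dict.insert PySem.Dict.empty src none))

-- ===== PRECONDITION & SPEC =====
-- Pre_ excludes exactly the inputs where the Python A raises IndexError (agent_pos shorter than
-- 2 while distinct from target_pos: `pos[1]` on the start tuple); B raises there too.
def Pre_bfs_next_action (agent_pos : List Int) (target_pos : List Int) (blocked_tiles : Option (List (List Int))) : Prop :=
  2 ≤ agent_pos.length ∨ agent_pos = target_pos
instance (agent_pos : List Int) (target_pos : List Int) (blocked_tiles : Option (List (List Int))) : Decidable (Pre_bfs_next_action agent_pos target_pos blocked_tiles) := by unfold Pre_bfs_next_action; infer_instance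

def pvWitness_bfs_next_action : List Int × List Int × Option (List (List Int)) :=
  ([0, 0], [2, 3], some [[1, 0], [0, 1]])

def Spec_bfs_next_action (agent_pos : List Int) (target_pos : List Int) (blocked_tiles : Option (List (List Int))) (out : Option String) : Prop := out = bfs_next_action_alt agent_pos target_pos blocked_tiles
instance (agent_pos : List Int) (target_pos : List Int) (blocked_tiles : Option (List (List Int))) (out : Option String) : Decidable (Spec_bfs_next_action agent_pos target_pos blocked_tiles out) := by unfold Spec_bfs_next_action; infer_instance

-- ===== CLAIM (what is proved, stated in full; the proofs are below) =====
def Claim_equal_bfs_next_action : Prop := ∀ (agent_pos : List Int) (target_pos : List Int) (blocked_tiles : Option (List (List Int))), Dom_bfs_next_action agent_pos target_pos blocked_tiles → Pre_bfs_next_action agent_pos target_pos blocked_tiles → Spec_bfs_next_action agent_pos target_pos blocked_tiles (bfs_next_action agent_pos target_pos blocked_tiles)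

-- ===== LEMMAS AND PROOFS =====

-- the 100 in-range grid cells (used only to bound the visited set, for A's fuel)
def pvGrid : List (List Int) :=
  (List.range 100).map (fun k => [((k / 10 : Nat) : Int), ((k % 10 : Nat) : Int)])

lemma mem_pvGrid {nr nc : Int} (h : 0 ≤ nr ∧ nr < 10 ∧ 0 ≤ nc ∧ nc < 10) :
    [nr, nc] ∈ pvGrid := by
  simp only [pvGrid, List.mem_map, List.mem_range]
  refine ⟨nr.toNat * 10 + nc.toNat, by omega, ?_⟩
  have h1 : (nr.toNat * 10 + nc.toNat) / 10 = nr.toNat := by omega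
  have h2 : (nr.toNat * 10 + nc.toNat) % 10 = nc.toNat := by omega
  rw [h1, h2]
  simp [Int.toNat_of_nonneg h.1, Int.toNat_of_nonneg h.2.2.1]

lemma pvVisBound (start : List Int) (vis : List (List Int)) (hnd : vis.Nodup)
    (hsub : ∀ x ∈ vis, x = start ∨ x ∈ pvGrid) : vis.length ≤ 101 := by
  have hsub' : ∀ x ∈ vis.toFinset, x ∈ (start :: pvGrid).toFinset := by
    intro x hx
    rw [List.mem_toFinset] at *
    rcases hsub x hx with h | h
    · simp [h]
    · simp [h]
  calc vis.length = vis.toFinset.card := (List.toFinset_card_of_nodup hnd).symm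
    _ ≤ (start :: pvGrid).toFinset.card := Finset.card_le_card hsub'
    _ ≤ (start :: pvGrid).length := List.toFinset_card_le _
    _ = 101 := by simp [pvGrid]

lemma pvHead_step (path : List String) (act : String) :
    (path ++ [act]).head? = some (match path.head? with | some w => w | none => act) := by
  cases path <;> rfl

lemma pvHeadD_step (path : List String) (act : String) :
    (path ++ [act]).headD "" = (match path.head? with | some w => w | none => act) := by
  cases path <;> rfl

-- lockstep of one popped node's expansion: A's queue is qF ++ qN (rest of current layer,
-- then the next layer built so far); B sees only the next-layer positions and the table
lemma pvScan_step (blocked : PySem.Set (List Int)) (goal start pos : List Int) (path : List String) :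
    ∀ (ms : List (String × Int × Int)) (qF qN : List (List Int × List String))
      (vis : PySem.Set (List Int)) (tbl : pvTbl),
      (∀ x, vis.contains x = (tbl.get? x).isSome) →
      (∀ e ∈ qF ++ qN, tbl.get? e.1 = some e.2.head?) →
      vis.Nodup → (∀ x ∈ vis, x = start ∨ x ∈ pvGrid) →
      ((∃ s, pvExpandA blocked goal pos path ms (qF ++ qN) vis = Sum.inl s ∧
             pvScanB blocked goal pos path.head? ms (qN.map Prod.fst) tbl = Except.error s) ∨
       (∃ qN' vis' tbl',
          pvExpandA blocked goal pos path ms (qF ++ qN) vis = Sum.inr (qF ++ qN', vis') ∧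
          pvScanB blocked goal pos path.head? ms (qN.map Prod.fst) tbl = Except.ok (qN'.map Prod.fst, tbl') ∧
          (∀ x, vis'.contains x = (tbl'.get? x).isSome) ∧
          (∀ e ∈ qF ++ qN', tbl'.get? e.1 = some e.2.head?) ∧
          vis'.Nodup ∧ (∀ x ∈ vis', x = start ∨ x ∈ pvGrid) ∧
          vis'.length + qN.length = vis.length + qN'.length)) := by
  intro ms
  induction ms with
  | nil =>
      intro qF qN vis tbl hk hq hnd hsub
      exact Or.inr ⟨qN, vis, tbl, rfl, rfl, hk, hq, hnd, hsub, by omega⟩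
  | cons m ms ih =>
      intro qF qN vis tbl hk hq hnd hsub
      obtain ⟨act, dr, dc⟩ := m
      simp only [pvExpandA, pvScanB]
      generalize ((PySem.List.pyGet? pos 0).getD 0) + dr = nr
      generalize ((PySem.List.pyGet? pos 1).getD 0) + dc = nc
      generalize hnpos : [nr, nc] = npos
      by_cases hr : (0 ≤ nr ∧ nr < 10 ∧ 0 ≤ nc ∧ nc < 10)
      · rw [if_neg (not_not_intro hr)]
        by_cases hb : blocked.contains npos = true
        · have hbm : npos ∈ blocked := by simpa [PySem.Set.contains] using hb
          have cA : (blocked.contains npos || vis.contains npos) = true := by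
            simp [PySem.Set.contains, hbm]
          have cB : ¬((0 ≤ nr ∧ nr < 10 ∧ 0 ≤ nc ∧ nc < 10) ∧
              blocked.contains npos = false ∧ tbl.get? npos = none) := by
            simp [PySem.Set.contains, hbm]
          rw [if_pos cA, if_neg cB]
          exact ih qF qN vis tbl hk hq hnd hsub
        · have hbf : blocked.contains npos = false := Bool.eq_false_iff.mpr hb
          have hbnm : npos ∉ blocked := by simpa [PySem.Set.contains] using hbf
          by_cases hv : (tbl.get? npos).isSome
          · have hvm : vis.contains npos = true := (hk npos).trans hv
            have hvmm : npos ∈ vis := by simpa [PySem.Set.contains] using hvm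
            have cA : (blocked.contains npos || vis.contains npos) = true := by
              simp [PySem.Set.contains, hvmm]
            have cB : ¬((0 ≤ nr ∧ nr < 10 ∧ 0 ≤ nc ∧ nc < 10) ∧
                blocked.contains npos = false ∧ tbl.get? npos = none) := by
              rintro ⟨-, -, h⟩
              rw [h] at hv
              simp at hv
            rw [if_pos cA, if_neg cB]
            exact ih qF qN vis tbl hk hq hnd hsub
          · have htn : tbl.get? npos = none := Option.not_isSome_iff_eq_none.mp hv
            have hvc : vis.contains npos = false := by rw [hk npos, htn]; rfl
            have hvnm : npos ∉ vis := by simpa [PySem.Set.contains] using hvc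
            have cA : ¬((blocked.contains npos || vis.contains npos) = true) := by
              simp [PySem.Set.contains, hbnm, hvnm]
            have cB : (0 ≤ nr ∧ nr < 10 ∧ 0 ≤ nc ∧ nc < 10) ∧
                blocked.contains npos = false ∧ tbl.get? npos = none := ⟨hr, hbf, htn⟩
            rw [if_neg cA, if_pos cB]
            by_cases hg : npos = goal
            · rw [if_pos hg, if_pos hg]
              exact Or.inl ⟨_, rfl, by rw [pvHeadD_step]⟩
            · rw [if_neg hg, if_neg hg]
              have hfresh : npos ∉ vis := by simpa [PySem.Set.contains] using hvc
              have hadd : PySem.Set.add vis npos = vis ++ [npos] := by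
                simp [PySem.Set.add, hfresh]
              have hk' : ∀ x, (PySem.Set.add vis npos).contains x =
                  ((tbl.insert npos (some (match path.head? with | some w => w | none => act))).get? x).isSome := by
                intro x
                rw [hadd, PySem.Dict.get?_insert]
                by_cases hx : x = npos
                · subst hx; simp [PySem.Set.contains]
                · rw [if_neg hx, ← hk x]
                  simp [PySem.Set.contains, hx]
              have hq' : ∀ e ∈ qF ++ (qN ++ [(npos, path ++ [act])]),
                  (tbl.insert npos (some (match path.head? with | some w => w | none => act))).get? e.1
                    = some e.2.head? := by
                intro e he
                rw [PySem.Dict.get?_insert]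
                rcases List.mem_append.mp he with h | h
                · have := hq e (List.mem_append_left _ h)
                  split
                  · next hx => rw [hx, htn] at this; cases this
                  · exact this
                rcases List.mem_append.mp h with h | h
                · have := hq e (List.mem_append_right _ h)
                  split
                  · next hx => rw [hx, htn] at this; cases this
                  · exact this
                · simp only [List.mem_singleton] at h
                  subst h
                  rw [if_pos rfl, pvHead_step]
              have hnd' : (PySem.Set.add vis npos).Nodup := by
                rw [hadd, List.nodup_append]
                refine ⟨hnd, List.nodup_singleton _, ?_⟩
                intro a ha b hb heq
                rw [heq, List.mem_singleton.mp hb] at ha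
                exact hfresh ha
              have hsub' : ∀ x ∈ PySem.Set.add vis npos, x = start ∨ x ∈ pvGrid := by
                intro x hx
                rw [hadd, List.mem_append] at hx
                rcases hx with hx | hx
                · exact hsub x hx
                · simp only [List.mem_singleton] at hx
                  subst hx
                  exact Or.inr (hnpos ▸ mem_pvGrid hr)
              have := ih qF (qN ++ [(npos, path ++ [act])]) (PySem.Set.add vis npos)
                (tbl.insert npos (some (match path.head? with | some w => w | none => act)))
                hk' hq' hnd' hsub'
              rw [← List.append_assoc] at this
              rcases this with ⟨s, hA, hB⟩ | ⟨qN', vis', tbl', hA, hB, r1, r2, r3, r4, r5⟩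
              · exact Or.inl ⟨s, hA, by simpa using hB⟩
              · refine Or.inr ⟨qN', vis', tbl', hA, by simpa using hB, r1, r2, r3, r4, ?_⟩
                rw [hadd] at r5
                simp at r5 ⊢
                omega
      · have cB : ¬((0 ≤ nr ∧ nr < 10 ∧ 0 ≤ nc ∧ nc < 10) ∧
            blocked.contains npos = false ∧ tbl.get? npos = none) := by simp [hr]
        rw [if_pos hr, if_neg cB]
        exact ih qF qN vis tbl hk hq hnd hsub

-- the main lockstep: A's FIFO loop against B's layered loop, mid-layer general form
lemma pvLoop_layers (blocked : PySem.Set (List Int)) (goal start : List Int) :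
    ∀ (fB : Nat) (qF qN : List (List Int × List String)) (vis : PySem.Set (List Int))
      (tbl : pvTbl) (fA : Nat),
      (∀ x, vis.contains x = (tbl.get? x).isSome) →
      (∀ e ∈ qF ++ qN, tbl.get? e.1 = some e.2.head?) →
      vis.Nodup → (∀ x ∈ vis, x = start ∨ x ∈ pvGrid) →
      (qF ++ qN).length + 101 ≤ fA + vis.length →
      102 + qN.length ≤ fB + vis.length →
      pvLoopA blocked goal fA (qF ++ qN) vis =
        (match pvLayerB blocked goal (qF.map Prod.fst) (qN.map Prod.fst) tbl with
         | Except.error s => s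
         | Except.ok (nxt, tbl') => pvLoopB blocked goal fB nxt tbl') := by
  intro fB
  induction fB with
  | zero =>
      intro qF qN vis tbl fA hk hq hnd hsub hfa hfb
      have := pvVisBound start vis hnd hsub
      omega
  | succ fB ihB =>
      intro qF qN vis tbl fA
      induction qF generalizing qN vis tbl fA with
      | nil =>
          intro hk hq hnd hsub hfa hfb
          simp only [List.map_nil, pvLayerB, List.nil_append]
          cases hqn : qN with
          | nil =>
              subst hqn
              cases fA <;> simp [pvLoopA, pvLoopB]
          | cons e rest =>
              subst hqn
              simp only [List.map_cons]
              rw [show pvLoopB blocked goal (fB + 1) (e.1 :: rest.map Prod.fst) tbl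
                  = (match pvLayerB blocked goal (e.1 :: rest.map Prod.fst) [] tbl with
                     | Except.error s => s
                     | Except.ok (nxt, tbl') => pvLoopB blocked goal fB nxt tbl') from rfl]
              have := ihB (e :: rest) [] vis tbl fA hk (by simpa using hq) hnd hsub
                (by simp only [List.nil_append, List.append_nil, List.length_cons] at hfa ⊢; omega)
                (by simp only [List.append_nil, List.length_cons, List.length_nil] at hfb ⊢; omega)
              simpa using this
      | cons e qF ihF =>
          intro hk hq hnd hsub hfa hfb
          obtain ⟨pos, path⟩ := e
          have hbound := pvVisBound start vis hnd hsub
          cases fA with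
          | zero => simp at hfa; omega
          | succ fA =>
              have hpos : tbl.get? pos = some path.head? := hq (pos, path) (by simp)
              simp only [List.cons_append, pvLoopA, List.map_cons, pvLayerB, hpos, Option.join_some]
              have hmv : pvMovesB = pvMovesA := rfl
              rw [hmv]
              rcases pvScan_step blocked goal start pos path pvMovesA qF qN vis tbl hk
                  (fun e he => hq e (List.mem_cons_of_mem _ he)) hnd hsub with
                ⟨s, hA, hB⟩ | ⟨qN', vis', tbl', hA, hB, r1, r2, r3, r4, r5⟩
              · rw [hA, hB]
              · rw [hA, hB]
                have := ihF qN' vis' tbl' fA r1 r2 r3 r4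
                  (by simp only [List.cons_append, List.length_cons, List.length_append]
                        at hfa ⊢; omega)
                  (by omega)
                exact this

-- ===== VERDICT (by name: the statement is the Claim_ definition above) =====
theorem bfs_next_action_spec : Claim_equal_bfs_next_action := by
  intro ap tp bt _ _
  unfold Spec_bfs_next_action bfs_next_action bfs_next_action_alt
  by_cases h : ap = tp
  · simp [h]
  · simp only [h, if_false]
    set blocked := PySem.Set.ofList (bt.getD [])
    set tbl0 : pvTbl := PySem.Dict.insert PySem.Dict.empty ap none with htbl0
    have hvis : PySem.Set.ofList [ap] = [ap] := by
      simp [PySem.Set.ofList, PySem.Set.add, PySem.Set.contains]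
    have hk : ∀ x, (PySem.Set.ofList [ap]).contains x = (tbl0.get? x).isSome := by
      intro x
      rw [hvis, htbl0, PySem.Dict.get?_insert]
      by_cases hx : x = ap
      · subst hx; simp [PySem.Set.contains]
      · simp [PySem.Set.contains, hx, PySem.Dict.get?_empty]
    have hq : ∀ e ∈ ([((ap : List Int), ([] : List String))] ++ []),
        tbl0.get? e.1 = some e.2.head? := by
      intro e he
      simp at he
      subst he
      exact PySem.Dict.get?_insert_self _ _ _
    have hnd : (PySem.Set.ofList [ap]).Nodup := by rw [hvis]; simp
    have hsub : ∀ x ∈ PySem.Set.ofList [ap], x = ap ∨ x ∈ pvGrid := by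
      rw [hvis]
      intro x hx
      simp at hx
      exact Or.inl hx
    have hmain := pvLoop_layers blocked tp ap 999 [(ap, [])] [] (PySem.Set.ofList [ap]) tbl0
      1000 hk hq hnd hsub (by rw [hvis]; simp) (by rw [hvis]; simp)
    simp only [List.append_nil] at hmain
    rw [hmain]
    rw [show pvLoopB blocked tp 1000 [ap] tbl0
        = (match pvLayerB blocked tp [ap] [] tbl0 with
           | Except.error s => s
           | Except.ok (nxt, tbl') => pvLoopB blocked tp 999 nxt tbl') from rfl]
    rfl
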